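-- pv_equiv track=rewrite | github.com/mjoshicodes/cpsc474-final-project | model/chopsticks/scoring.py | greedy_split
-- ===== SOURCE A (Python) =====
-- from itertools import combinations, product, combinations_with_replacement
--
-- def greedy_split(left_hand, right_hand, opponent_left_hand, opponent_right_hand):
--     if left_hand == 0 or right_hand == 0:
--         return None
--
--     my_hand_sum = left_hand + right_hand
--     possible_hand_values = list(range(1, max(left_hand, right_hand)+1))
--
--     if 5 in possible_hand_values:
--         possible_hand_values.remove(5)
--
--     combos = list(combinations_with_replacement(possible_hand_values, 2))
--     split_combinations = [combo for combo in combos if sum(combo) == my_hand_sum and (combo != (left_hand, right_hand) and combo != (right_hand, left_hand))]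
--     if len(split_combinations) == 0:
--             return None
--
--     def score(split):
--         left_hand, right_hand = split
--
--         if left_hand + opponent_left_hand == 5 or left_hand + opponent_right_hand == 5:
--             return left_hand, right_hand, -1
--         else:
--             return left_hand, right_hand, 1
--
--     return max(map(lambda split: score(split), split_combinations), key=lambda t: t[2])
-- ===== SOURCE B (Python) =====
-- def greedy_split(left_hand, right_hand, opponent_left_hand, opponent_right_hand):
--     if left_hand == 0 or right_hand == 0:
--         return None
--     total = left_hand + right_hand
--     top = max(left_hand, right_hand)
--     best = None
--     for a in range(1, top + 1):
--         if a == 5: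
--             continue
--         b = total - a
--         if a > b or b == 5 or b < 1 or b > top:
--             continue
--         if (a, b) == (left_hand, right_hand) or (a, b) == (right_hand, left_hand):
--             continue
--         s = -1 if (a + opponent_left_hand == 5 or a + opponent_right_hand == 5) else 1
--         if best is None or s > best[2]:
--             best = (a, b, s)
--     return best
-- ===== Notes on version B (the rewrite author's own statement) =====
-- stated objective: faster
-- what changed: Instead of materialising all combinations_with_replacement pairs and filtering by sum, B makes a single ascending pass over the possible values, derives the unique partner b = total - a arithmetically, checks validity with O(1) range tests, and keeps the first strictly better scored pair as a running best.
import Mathlib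
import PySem

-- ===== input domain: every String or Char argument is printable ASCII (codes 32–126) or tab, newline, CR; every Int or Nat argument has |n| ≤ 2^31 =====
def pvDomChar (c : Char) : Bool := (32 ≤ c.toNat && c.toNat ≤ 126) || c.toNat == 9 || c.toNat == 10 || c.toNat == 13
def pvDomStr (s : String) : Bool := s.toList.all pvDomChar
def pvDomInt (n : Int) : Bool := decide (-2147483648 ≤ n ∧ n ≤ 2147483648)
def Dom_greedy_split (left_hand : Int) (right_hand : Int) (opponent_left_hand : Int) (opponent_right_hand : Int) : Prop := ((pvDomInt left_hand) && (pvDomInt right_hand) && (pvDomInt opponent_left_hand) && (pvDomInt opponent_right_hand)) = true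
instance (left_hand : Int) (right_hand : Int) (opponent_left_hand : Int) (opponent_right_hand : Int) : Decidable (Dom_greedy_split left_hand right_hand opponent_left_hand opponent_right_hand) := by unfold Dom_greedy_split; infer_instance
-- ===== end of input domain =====

-- B replaces A's quadratic combinations_with_replacement enumeration by a single ascending
-- pass that derives each pair's partner arithmetically (faster: one pass over the value range).

-- ===== PORT A =====
def pyScore (oL oR : Int) (split : Int × Int) : Int × Int × Int :=
  if split.1 + oL == 5 || split.1 + oR == 5 then (split.1, split.2, -1)
  else (split.1, split.2, 1)

def cwr2 : List Int → List (Int × Int)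
  | [] => []
  | x :: xs => (x :: xs).map (fun y => (x, y)) ++ cwr2 xs

def greedy_split (left_hand : Int) (right_hand : Int) (opponent_left_hand : Int) (opponent_right_hand : Int) : Option (Int × Int × Int) :=
  if left_hand == 0 || right_hand == 0 then none
  else
    let my_hand_sum := left_hand + right_hand
    let vals0 := PySem.List.pyRange 1 (max left_hand right_hand + 1) 1
    let vals := if 5 ∈ vals0 then (PySem.List.remove? vals0 5).getD vals0 else vals0
    let combos := cwr2 vals
    let split_combinations := combos.filter (fun c =>
      c.1 + c.2 == my_hand_sum &&
      (!(c == (left_hand, right_hand)) && !(c == (right_hand, left_hand))))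
    if split_combinations.length == 0 then none
    else
      PySem.List.max?
        (split_combinations.map (fun s => pyScore opponent_left_hand opponent_right_hand s))
        (fun t => t.2.2)

-- ===== PORT B =====
def altStep (left_hand right_hand opponent_left_hand opponent_right_hand total top : Int)
    (best : Option (Int × Int × Int)) (a : Int) : Option (Int × Int × Int) :=
  if a == 5 then best
  else
    let b := total - a
    if a > b || b == 5 || b < 1 || b > top then best
    else if (a, b) == (left_hand, right_hand) || (a, b) == (right_hand, left_hand) then best
    else
      let s : Int := if a + opponent_left_hand == 5 || a + opponent_right_hand == 5 then -1 else 1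
      match best with
      | none => some (a, b, s)
      | some m => if s > m.2.2 then some (a, b, s) else best

def greedy_split_alt (left_hand : Int) (right_hand : Int) (opponent_left_hand : Int) (opponent_right_hand : Int) : Option (Int × Int × Int) :=
  if left_hand == 0 || right_hand == 0 then none
  else
    let total := left_hand + right_hand
    let top := max left_hand right_hand
    (PySem.List.pyRange 1 (top + 1) 1).foldl
      (altStep left_hand right_hand opponent_left_hand opponent_right_hand total top) none

-- ===== PRECONDITION & SPEC =====
def Spec_greedy_split (left_hand : Int) (right_hand : Int) (opponent_left_hand : Int) (opponent_right_hand : Int) (out : Option (Int × Int × Int)) : Prop := out = greedy_split_alt left_hand right_hand opponent_left_hand opponent_right_hand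
instance (left_hand : Int) (right_hand : Int) (opponent_left_hand : Int) (opponent_right_hand : Int) (out : Option (Int × Int × Int)) : Decidable (Spec_greedy_split left_hand right_hand opponent_left_hand opponent_right_hand out) := by unfold Spec_greedy_split; infer_instance

-- ===== CLAIM (what is proved, stated in full; the proofs are below) =====
def Claim_equal_greedy_split : Prop := ∀ (left_hand : Int) (right_hand : Int) (opponent_left_hand : Int) (opponent_right_hand : Int), Dom_greedy_split left_hand right_hand opponent_left_hand opponent_right_hand → Spec_greedy_split left_hand right_hand opponent_left_hand opponent_right_hand (greedy_split left_hand right_hand opponent_left_hand opponent_right_hand)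

-- ===== LEMMAS AND PROOFS =====

-- the filter predicate of A's list comprehension
def pPair (S lh rh : Int) (c : Int × Int) : Bool :=
  (c.1 + c.2 == S) && (!(c == (lh, rh)) && !(c == (rh, lh)))

-- the unique candidate pair contributed by a first component a (if any)
def gCand (S lh rh : Int) (L : List Int) (a : Int) : Option (Int × Int) :=
  if (S - a) ∈ L ∧ a ≤ S - a ∧ pPair S lh rh (a, S - a) = true then some (a, S - a) else none

-- Python max-with-key's running step (strict improvement keeps the first maximum)
def mStep (acc : Option (Int × Int × Int)) (x : Int × Int × Int) : Option (Int × Int × Int) :=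
  match acc with
  | none => some x
  | some m => if m.2.2 < x.2.2 then some x else some m

-- a nodup list filtered by "equals v and q" is the obvious singleton or empty
theorem filter_eq_singleton (l : List Int) (v : Int) (q : Int → Bool) (h : l.Nodup) :
    l.filter (fun y => (y == v) && q y) = if v ∈ l ∧ q v = true then [v] else [] := by
  induction l with
  | nil => simp
  | cons x xs ih =>
    rw [List.nodup_cons] at h
    rw [List.filter_cons]
    by_cases hx : x = v
    · subst hx
      have hnotin : x ∉ xs := h.1
      have : xs.filter (fun y => (y == x) && q y) = [] := by
        rw [List.filter_eq_nil_iff]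
        intro a ha
        simp only [Bool.and_eq_true, beq_iff_eq]
        rintro ⟨rfl, -⟩; exact hnotin ha
      by_cases hq : q x = true
      · simp [hq, this]
      · simp [hq, this, hnotin]
    · have : ((x == v) && q x) = false := by simp [hx]
      rw [this, ih h.2]
      have : (v ∈ x :: xs ∧ q v = true) ↔ (v ∈ xs ∧ q v = true) := by
        constructor
        · rintro ⟨hm, hq⟩
          rcases List.mem_cons.1 hm with rfl | hm
          · exact absurd rfl hx
          · exact ⟨hm, hq⟩
        · rintro ⟨hm, hq⟩; exact ⟨List.mem_cons_of_mem _ hm, hq⟩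
      simp only [this]
      simp

-- A's filtered combinations_with_replacement over a strictly sorted list, as a filterMap
theorem cwr_filter (S lh rh : Int) (L : List Int) (h : L.Pairwise (· < ·)) :
    (cwr2 L).filter (pPair S lh rh) = L.filterMap (gCand S lh rh L) := by
  induction L with
  | nil => simp [cwr2]
  | cons x xs ih =>
    rw [List.pairwise_cons] at h
    have hnd : (x :: xs).Nodup := by
      have hp : (x :: xs).Pairwise (· < ·) := List.pairwise_cons.2 h
      exact hp.imp (fun hlt => ne_of_lt hlt)
    have hfm : ((x :: xs).map (fun y => (x, y))).filter (pPair S lh rh)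
        = ((x :: xs).filter (fun y => (y == S - x) && (!((x, y) == (lh, rh)) && !((x, y) == (rh, lh))))).map (fun y => (x, y)) := by
      rw [List.filter_map]
      congr 1
      apply List.filter_congr
      intro y _
      show pPair S lh rh (x, y) = _
      unfold pPair
      congr 1
      · by_cases hy : x + y = S
        · simp [hy]; omega
        · have : ¬ (y = S - x) := by omega
          simp [hy, this]
    have hhead : ((x :: xs).filter (fun y => (y == S - x) && (!((x, y) == (lh, rh)) && !((x, y) == (rh, lh)))))
        = if (S - x) ∈ x :: xs ∧ (!((x, S - x) == (lh, rh)) && !((x, S - x) == (rh, lh))) = true then [S - x] else [] :=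
      filter_eq_singleton _ _ _ hnd
    have hcond : ((S - x) ∈ x :: xs ∧ (!((x, S - x) == (lh, rh)) && !((x, S - x) == (rh, lh))) = true)
        ↔ ((S - x) ∈ x :: xs ∧ x ≤ S - x ∧ pPair S lh rh (x, S - x) = true) := by
      unfold pPair
      constructor
      · rintro ⟨hm, hq⟩
        refine ⟨hm, ?_, ?_⟩
        · rcases List.mem_cons.1 hm with heq | hm'
          · omega
          · exact le_of_lt (h.1 _ hm')
        · simp only [Bool.and_eq_true]
          refine ⟨?_, by simpa using hq⟩
          simp only [beq_iff_eq]; omega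
      · rintro ⟨hm, -, hq⟩
        simp only [Bool.and_eq_true] at hq
        exact ⟨hm, by simp [hq.2]⟩
    have htail : xs.filterMap (gCand S lh rh xs) = xs.filterMap (gCand S lh rh (x :: xs)) := by
      apply List.filterMap_congr
      intro a ha
      unfold gCand
      have : ((S - a) ∈ xs ∧ a ≤ S - a ∧ pPair S lh rh (a, S - a) = true)
          ↔ ((S - a) ∈ x :: xs ∧ a ≤ S - a ∧ pPair S lh rh (a, S - a) = true) := by
        constructor
        · rintro ⟨hm, h2, h3⟩; exact ⟨List.mem_cons_of_mem _ hm, h2, h3⟩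
        · rintro ⟨hm, h2, h3⟩
          rcases List.mem_cons.1 hm with heq | hm'
          · exfalso; have := h.1 a ha; omega
          · exact ⟨hm', h2, h3⟩
      simp only [this]
    show ((x :: xs).map (fun y => (x, y)) ++ cwr2 xs).filter (pPair S lh rh) = _
    rw [List.filter_append, hfm, hhead, ih h.2, htail]
    rw [List.filterMap_cons]
    unfold gCand
    by_cases hc : ((S - x) ∈ x :: xs ∧ x ≤ S - x ∧ pPair S lh rh (x, S - x) = true)
    · rw [if_pos (hcond.2 hc), if_pos hc]; simp
    · rw [if_neg (fun hh => hc (hcond.1 hh)), if_neg hc]; simp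

-- A and B agree on every input
theorem greedy_split_eq (lh rh oL oR : Int) :
    greedy_split lh rh oL oR = greedy_split_alt lh rh oL oR := by
  unfold greedy_split greedy_split_alt
  by_cases h0 : (lh == 0 || rh == 0) = true
  · simp only [h0, if_true]
  · simp only [h0]
    set S := lh + rh with hS
    set top := max lh rh with htop
    set R := PySem.List.pyRange 1 (top + 1) 1 with hRdef
    set F := R.filter (fun a => !(a == 5)) with hF
    have hRpw : R.Pairwise (· < ·) := PySem.List.pairwise_lt_pyRange_one 1 (top + 1)
    have hRnd : R.Nodup := hRpw.imp (fun hlt => ne_of_lt hlt)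
    have hFpw : F.Pairwise (· < ·) := hRpw.filter _
    -- vals = F
    have hvals : (if 5 ∈ R then (PySem.List.remove? R 5).getD R else R) = F := by
      by_cases h5 : (5 : Int) ∈ R
      · rw [if_pos h5, PySem.List.remove?_eq_some_erase R 5 h5, Option.getD_some,
           hRnd.erase_eq_filter]
        rfl
      · rw [if_neg h5, hF]
        symm
        apply List.filter_eq_self.2
        intro a ha
        simp only [Bool.not_eq_true', beq_eq_false_iff_ne]
        rintro rfl
        exact h5 ha
    rw [hvals]
    -- A's side: the filtered combinations as a filterMap
    have hsplits : (cwr2 F).filter (fun c =>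
        c.1 + c.2 == S && (!(c == (lh, rh)) && !(c == (rh, lh)))) = F.filterMap (gCand S lh rh F) :=
      cwr_filter S lh rh F hFpw
    rw [hsplits]
    -- A = foldl mStep none over the scored candidates (empty guard is absorbed)
    have hmax :
        (if (F.filterMap (gCand S lh rh F)).length == 0 then none
          else PySem.List.max? ((F.filterMap (gCand S lh rh F)).map (fun s => pyScore oL oR s)) (fun t => t.2.2))
        = ((F.filterMap (gCand S lh rh F)).map (fun s => pyScore oL oR s)).foldl mStep none := by
      by_cases he : F.filterMap (gCand S lh rh F) = []
      · simp [he]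
      · rw [if_neg (by simp [he])]
        simp only [PySem.List.max?]
        apply PySem.List.foldl_congr_mem
        intro acc x _
        cases acc <;> rfl
    rw [hmax]
    rw [List.foldl_map, List.foldl_filterMap]
    -- B's side: drop the a == 5 skip into a filter
    have hstep : altStep lh rh oL oR S top = fun (acc : Option (Int × Int × Int)) (a : Int) =>
        if (!(a == 5)) = true then
          (if a > S - a || S - a == 5 || S - a < 1 || S - a > top then acc
           else if (a, S - a) == (lh, rh) || (a, S - a) == (rh, lh) then acc
           else
             let s : Int := if a + oL == 5 || a + oR == 5 then -1 else 1
             match acc with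
             | none => some (a, S - a, s)
             | some m => if s > m.2.2 then some (a, S - a, s) else acc)
        else acc := by
      funext acc a
      unfold altStep
      by_cases h5 : (a == 5) = true
      · simp [h5]
      · simp only [h5, Bool.not_false, if_true]
        rfl
    rw [hstep, ← List.foldl_filter, ← hF]
    -- pointwise agreement on F
    apply PySem.List.foldl_congr_mem
    intro acc a ha
    rw [hF, List.mem_filter] at ha
    have haR : 1 ≤ a ∧ a < top + 1 := PySem.List.mem_pyRange_one.1 ha.1
    have ha5 : a ≠ 5 := by simpa using ha.2
    have hmemF : ∀ x : Int, x ∈ F ↔ (1 ≤ x ∧ x < top + 1) ∧ x ≠ 5 := by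
      intro x
      rw [hF, List.mem_filter, PySem.List.mem_pyRange_one]
      simp
    by_cases hb : (a > S - a || S - a == 5 || S - a < 1 || S - a > top) = true
    · rw [if_pos hb]
      have : gCand S lh rh F a = none := by
        unfold gCand
        rw [if_neg]
        rintro ⟨hm, hle, -⟩
        rw [hmemF] at hm
        simp only [Bool.or_eq_true, decide_eq_true_eq, beq_iff_eq] at hb
        omega
      rw [this]
    · rw [if_neg hb]
      simp only [Bool.or_eq_true, decide_eq_true_eq, beq_iff_eq, not_or, not_lt] at hb
      by_cases hp : ((a, S - a) == (lh, rh) || (a, S - a) == (rh, lh)) = true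
      · rw [if_pos hp]
        have : gCand S lh rh F a = none := by
          unfold gCand
          rw [if_neg]
          rintro ⟨-, -, hpp⟩
          unfold pPair at hpp
          simp only [Bool.and_eq_true, Bool.not_eq_true', beq_eq_false_iff_ne] at hpp
          simp only [Bool.or_eq_true, beq_iff_eq] at hp
          rcases hp with hp | hp
          · exact hpp.2.1 hp
          · exact hpp.2.2 hp
        rw [this]
      · rw [if_neg hp]
        have : gCand S lh rh F a = some (a, S - a) := by
          unfold gCand
          rw [if_pos]
          refine ⟨(hmemF _).2 ⟨⟨by omega, by omega⟩, by omega⟩, by omega, ?_⟩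
          unfold pPair
          simp only [Bool.and_eq_true, Bool.not_eq_true', beq_eq_false_iff_ne, beq_iff_eq]
          simp only [Bool.or_eq_true, beq_iff_eq, not_or] at hp
          exact ⟨by omega, hp.1, hp.2⟩
        rw [this]
        unfold pyScore mStep
        by_cases hsc : (a + oL == 5 || a + oR == 5) = true
        · simp only [hsc, if_true]
          cases acc with
          | none => rfl
          | some m => rfl
        · simp only [hsc]
          cases acc with
          | none => rfl
          | some m => rfl

-- ===== VERDICT (by name: the statement is the Claim_ definition above) =====
theorem greedy_split_spec : Claim_equal_greedy_split := by
  intro lh rh oL oR _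
  exact greedy_split_eq lh rh oL oR
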